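-- pv_equiv track=rewrite | github.com/Aryan-lomte05/SmartCityPlanner | backend/app/core/sets_zone.py | inclusion_exclusion_total
-- ===== SOURCE A (Python) =====
-- from typing import List, Dict, Set
--
-- def inclusion_exclusion_total(zones: Dict[str, Set[str]]) -> Dict[str, int]:
--     """
--     zones: mapping zone_name -> set(resource_ids) assigned to that zone
--     Returns mapping zone_name -> true resource count after accounting overlaps
--     (here returns counts per zone using inclusion/exclusion across pairwise overlaps).
--     For simplicity we compute:
--       true_count(zone) = |zone_set| - sum(|zone ∩ other|) + sum(|zone ∩ other ∩ other2|) ...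
--     Limited to up to triple intersections for speed; extend as needed.
--     """
--     from itertools import combinations
--     result = {}
--     names = list(zones.keys())
--     for i, name in enumerate(names):
--         base = zones[name]
--         total = len(base)
--         # subtract pairwise overlaps
--         for j in range(len(names)):
--             if j == i:
--                 continue
--             inter = base & zones[names[j]]
--             total -= len(inter)
--         # add back triple overlaps
--         for a, b in combinations([n for n in names if n != name], 2):
--             inter = base & zones[a] & zones[b]
--             total += len(inter)
--         result[name] = max(0, total)
--     return result
-- ===== SOURCE B (Python) =====
-- from typing import Dict, Set
--
-- def inclusion_exclusion_total(zones: Dict[str, Set[str]]) -> Dict[str, int]: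
--     # One pass: count, for every resource, how many zones contain it; then each
--     # element of a zone contributes 1 - d + d*(d-1)//2 where d = (#zones holding it) - 1.
--     cnt = {}
--     for s in zones.values():
--         for x in s:
--             cnt[x] = cnt.get(x, 0) + 1
--     result = {}
--     for name, s in zones.items():
--         total = 0
--         for x in s:
--             d = cnt[x] - 1
--             total += 1 - d + d * (d - 1) // 2
--         result[name] = max(0, total)
--     return result
-- ===== Notes on version B (the rewrite author's own statement) =====
-- stated objective: faster
-- what changed: Replaces the per-zone scans over every other zone and every pair of other zones (set intersections up to triple) by one global per-resource zone-membership counter; each resource of a zone contributes 1 - d + d*(d-1)//2 where d is the number of other zones holding it. Pre_ only states the well-formedness the Python types guarantee (distinct zone names, distinct resources per zone).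
import Mathlib
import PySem

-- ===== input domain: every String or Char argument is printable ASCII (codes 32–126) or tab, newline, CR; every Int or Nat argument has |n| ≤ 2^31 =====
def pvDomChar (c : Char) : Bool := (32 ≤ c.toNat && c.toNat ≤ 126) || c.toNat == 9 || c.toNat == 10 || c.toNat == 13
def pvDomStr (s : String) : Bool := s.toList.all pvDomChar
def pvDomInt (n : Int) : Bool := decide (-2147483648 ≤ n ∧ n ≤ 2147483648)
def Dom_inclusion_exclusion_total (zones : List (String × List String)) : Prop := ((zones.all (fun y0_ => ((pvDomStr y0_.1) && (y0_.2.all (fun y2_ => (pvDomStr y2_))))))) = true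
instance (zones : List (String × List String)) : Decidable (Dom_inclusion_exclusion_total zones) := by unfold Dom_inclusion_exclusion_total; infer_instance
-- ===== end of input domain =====

-- B replaces A's per-zone scans over all other zones and all pairs of other zones by one
-- global per-resource zone-membership counter (each resource contributes 1 - d + C(d,2)).

-- ===== PORT A =====
-- set intersection, kept as "left operand filtered" (only lengths of intersections are used by A)
def pvInter (xs ys : List String) : List String := xs.filter (fun x => ys.contains x)

-- itertools.combinations(l, 2), in itertools order
def pvCombos2 {α : Type} : List α → List (α × α)
  | [] => []
  | x :: xs => xs.map (fun y => (x, y)) ++ pvCombos2 xs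

-- loop body of A (one zone: base count, minus pairwise overlaps, plus triple overlaps)
def pvAbody (d : PySem.Dict String (List String)) (names : List String) (iname : Int × String) : Int :=
  let base := d.getD iname.2 []
  let total : Int := base.length
  let total := (PySem.List.enumerate names).foldl (fun t jnj =>
      if jnj.1 = iname.1 then t
      else t - ((pvInter base (d.getD jnj.2 [])).length : Int)) total
  let total := (pvCombos2 (names.filter (fun n => n != iname.2))).foldl (fun t ab =>
      t + ((pvInter (pvInter base (d.getD ab.1 [])) (d.getD ab.2 [])).length : Int)) total
  total

def inclusion_exclusion_total (zones : List (String × List String)) : List (String × Int) :=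
  let d := PySem.Dict.mk zones
  let names := PySem.Dict.keys d
  ((PySem.List.enumerate names).foldl (fun result iname =>
    result.insert iname.2 (max 0 (pvAbody d names iname))) PySem.Dict.empty).items

-- ===== PORT B =====
-- loop body of B (sum of per-resource contributions 1 - d + d*(d-1)//2)
def pvBbody (cnt : PySem.Dict String Int) (s : List String) : Int :=
  s.foldl (fun t x =>
    let d := cnt.getD x 0 - 1
    t + (1 - d + PySem.Int.floordiv (d * (d - 1)) 2)) (0 : Int)

def inclusion_exclusion_total_alt (zones : List (String × List String)) : List (String × Int) :=
  let cnt := zones.foldl (fun c p => p.2.foldl (fun c x => c.insert x (c.getD x 0 + 1)) c)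
    (PySem.Dict.empty : PySem.Dict String Int)
  (zones.foldl (fun result p =>
    result.insert p.1 (max 0 (pvBbody cnt p.2))) (PySem.Dict.empty : PySem.Dict String Int)).items

-- ===== PRECONDITION & SPEC =====
-- Pre_ states only the well-formedness the Python argument types guarantee (a dict of sets):
-- distinct zone names and distinct resources inside each zone; it excludes no input A accepts.
def Pre_inclusion_exclusion_total (zones : List (String × List String)) : Prop :=
  (zones.map Prod.fst).Nodup ∧ ∀ p ∈ zones, p.2.Nodup
instance (zones : List (String × List String)) : Decidable (Pre_inclusion_exclusion_total zones) := by
  unfold Pre_inclusion_exclusion_total; infer_instance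

def pvWitness_inclusion_exclusion_total : (List (String × List String)) :=
  [("a", ["x", "y"]), ("b", ["y"])]

def Spec_inclusion_exclusion_total (zones : List (String × List String)) (out : List (String × Int)) : Prop := out = inclusion_exclusion_total_alt zones
instance (zones : List (String × List String)) (out : List (String × Int)) : Decidable (Spec_inclusion_exclusion_total zones out) := by unfold Spec_inclusion_exclusion_total; infer_instance

-- ===== CLAIM (what is proved, stated in full; the proofs are below) =====
def Claim_equal_inclusion_exclusion_total : Prop := ∀ (zones : List (String × List String)), Dom_inclusion_exclusion_total zones → Pre_inclusion_exclusion_total zones → Spec_inclusion_exclusion_total zones (inclusion_exclusion_total zones)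

-- ===== LEMMAS AND PROOFS =====

-- helper: zone-membership count of a resource among a list of zone contents
def pvCnt (x : String) (L : List (List String)) : Nat := L.countP (fun S => decide (x ∈ S))

-- helper: C(c,2)
def pvCh2 (c : Nat) : Nat := c * (c - 1) / 2

-- helper: per-element inclusion-exclusion contribution
def pvG (c : Nat) : Int := 1 - (c : Int) + (pvCh2 c : Int)

def pvISum (base : List String) (L : List (List String)) : Int :=
  (L.map (fun S => ((pvInter base S).length : Int))).sum

def pvPSum (base : List String) (L : List (List String)) : Int :=
  ((pvCombos2 L).map (fun ab => ((pvInter (pvInter base ab.1) ab.2).length : Int))).sum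

def pvOth (zones : List (String × List String)) (k : String) : List (String × List String) :=
  zones.filter (fun q => q.1 != k)

def pvL (zones : List (String × List String)) (k : String) : List (List String) :=
  (pvOth zones k).map Prod.snd

def pvSum (zones : List (String × List String)) (k : String) : Int :=
  (((PySem.Dict.mk zones).getD k []).map (fun x => pvG (pvCnt x (pvL zones k)))).sum

-- ch2 arithmetic
lemma pvCh2_mul2 (c : Nat) : pvCh2 c * 2 = c * (c - 1) := by
  unfold pvCh2
  apply Nat.div_mul_cancel
  rcases c with _ | d
  · simp
  · simpa [Nat.succ_sub_one, Nat.mul_comm] using (Nat.even_mul_succ_self d).two_dvd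

lemma pvCh2_succ (c : Nat) : pvCh2 (c + 1) = pvCh2 c + c := by
  have a := pvCh2_mul2 c
  have b := pvCh2_mul2 (c + 1)
  have hb : (c + 1) * (c + 1 - 1) = c * (c - 1) + 2 * c := by
    rcases c with _ | d
    · simp
    · simp only [Nat.succ_sub_one]; ring
  rw [hb] at b
  generalize c * (c - 1) = P at a b
  omega

lemma pvFD (c : Nat) :
    PySem.Int.floordiv ((c : Int) * ((c : Int) - 1)) 2 = (pvCh2 c : Int) := by
  rw [PySem.Int.floordiv_eq_iff_of_pos (by norm_num)]
  have h : ((pvCh2 c : Int)) * 2 = (c : Int) * ((c : Int) - 1) := by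
    rcases c with _ | d
    · simp [pvCh2]
    · have M : pvCh2 (d + 1) * 2 = (d + 1) * d := by
        have := pvCh2_mul2 (d + 1); simpa [Nat.succ_sub_one] using this
      push_cast
      rw [show ((d : Int) + 1) - 1 = (d : Int) by ring]
      exact_mod_cast M
  constructor
  · rw [← h]
  · rw [← h]; linarith

-- generic fold-to-sum (subtraction form; the + form is PySem.List.foldl_add)
lemma foldl_sub_sum {α : Type} (E : List α) (f : α → Int) (t0 : Int) :
    E.foldl (fun t e => t - f e) t0 = t0 - (E.map f).sum := by
  induction E generalizing t0 with
  | nil => simp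
  | cons e E ih => simp only [List.foldl_cons, List.map_cons, List.sum_cons, ih]; ring

lemma sum_map_sub_int {α : Type} (l : List α) (f g : α → Int) :
    (l.map (fun x => f x - g x)).sum = (l.map f).sum - (l.map g).sum := by
  induction l with
  | nil => simp
  | cons x xs ih => simp only [List.map_cons, List.sum_cons, ih]; ring

lemma sum_map_filter_ite {α : Type} (p : α → Bool) (f : α → Int) (l : List α) :
    ((l.filter p).map f).sum = (l.map (fun x => if p x then f x else 0)).sum := by
  induction l with
  | nil => simp
  | cons x xs ih => by_cases hp : p x <;> simp [List.filter_cons, hp, ih]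

-- enumerate facts
lemma enum_fst_le {α : Type} (names : List α) (s : Int) (q : Int × α)
    (h : q ∈ PySem.List.enumerate names s) : s ≤ q.1 := by
  induction names generalizing s with
  | nil => simp [PySem.List.enumerate_nil] at h
  | cons n rest ih =>
    rw [PySem.List.enumerate_cons] at h
    rcases List.mem_cons.1 h with h0 | h1
    · subst h0; simp
    · have := ih (s + 1) h1; omega

lemma enum_sum_skip {α : Type} (f : α → Int) (names : List α) (s i : Int) (name : α)
    (h : (i, name) ∈ PySem.List.enumerate names s) :
    ((PySem.List.enumerate names s).map (fun q => if q.1 = i then 0 else f q.2)).sum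
      = (names.map f).sum - f name := by
  induction names generalizing s with
  | nil => simp [PySem.List.enumerate_nil] at h
  | cons n0 rest ih =>
    rw [PySem.List.enumerate_cons] at h ⊢
    rcases List.mem_cons.1 h with h0 | h1
    · injection h0 with hi hn
      simp only [List.map_cons, List.sum_cons]
      rw [if_pos hi.symm]
      have htail : (PySem.List.enumerate rest (s + 1)).map
            (fun q => if q.1 = i then 0 else f q.2)
          = (PySem.List.enumerate rest (s + 1)).map (fun q => f q.2) := by
        apply List.map_congr_left
        intro q hq
        have := enum_fst_le rest (s + 1) q hq
        simp [show ¬ (q.1 = i) by omega]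
      rw [htail]
      rw [show (fun (q : Int × α) => f q.2) = f ∘ (fun q => q.2) from rfl, ← List.map_map,
        PySem.List.map_snd_enumerate, hn]
      ring
    · have hne : ¬ ((s : Int) = i) := by
        have := enum_fst_le rest (s + 1) (i, name) h1
        simp at this; omega
      simp only [List.map_cons, List.sum_cons, if_neg hne]
      rw [ih (s + 1) h1]
      ring

-- sum over a nodup list splits off one element
lemma sum_split_mem (f : String → Int) (l : List String) (a : String)
    (hnd : l.Nodup) (ha : a ∈ l) :
    (l.map f).sum = f a + ((l.filter (fun n => n != a)).map f).sum := by
  induction l with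
  | nil => simp at ha
  | cons h t ih =>
    obtain ⟨hht, hndt⟩ := List.nodup_cons.1 hnd
    by_cases he : h = a
    · subst he
      have hf : t.filter (fun n => n != h) = t := by
        apply List.filter_eq_self.2
        intro b hb
        simp [show b ≠ h from fun e => hht (e ▸ hb)]
      simp [List.filter_cons, hf]
    · have ha' : a ∈ t := by
        rcases List.mem_cons.1 ha with h0 | h0
        · exact absurd h0.symm he
        · exact h0
      have hb : (h != a) = true := by simp [he]
      simp only [List.filter_cons, hb, if_true, List.map_cons, List.sum_cons]
      rw [ih hndt ha']
      ring

-- combinations facts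
lemma combos2_map {α β : Type} (f : α → β) (l : List α) :
    pvCombos2 (l.map f) = (pvCombos2 l).map (fun ab => (f ab.1, f ab.2)) := by
  induction l with
  | nil => rfl
  | cons x xs ih => simp [pvCombos2, ih, List.map_map]

lemma combos2_mem {α : Type} {l : List α} {ab : α × α} (h : ab ∈ pvCombos2 l) :
    ab.1 ∈ l ∧ ab.2 ∈ l := by
  induction l with
  | nil => simp [pvCombos2] at h
  | cons x xs ih =>
    simp only [pvCombos2, List.mem_append] at h
    rcases h with h | h
    · obtain ⟨y, hy, he⟩ := List.mem_map.1 h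
      subst he; exact ⟨List.mem_cons_self, List.mem_cons_of_mem _ hy⟩
    · obtain ⟨h1, h2⟩ := ih h
      exact ⟨List.mem_cons_of_mem _ h1, List.mem_cons_of_mem _ h2⟩

-- intersection length as a 0/1 sum
lemma inter_length_sum (base S : List String) :
    ((pvInter base S).length : Int)
      = (base.map (fun x => if x ∈ S then (1 : Int) else 0)).sum := by
  induction base with
  | nil => simp [pvInter]
  | cons x xs ih =>
    by_cases h : x ∈ S <;>
      simp [pvInter, List.filter_cons, h] at ih ⊢ <;> omega

lemma isum_eq (base : List String) (L : List (List String)) :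
    pvISum base L = (base.map (fun x => (pvCnt x L : Int))).sum := by
  induction L with
  | nil =>
    simp [pvISum, pvCnt]
  | cons S L ih =>
    have hcnt : (base.map (fun x => (pvCnt x (S :: L) : Int))).sum
        = (base.map (fun x => (if x ∈ S then (1 : Int) else 0) + (pvCnt x L : Int))).sum := by
      apply congrArg
      apply List.map_congr_left
      intro x _
      simp only [pvCnt, List.countP_cons]
      by_cases h : x ∈ S <;> simp [h] <;> push_cast <;> ring
    rw [hcnt, PySem.List.sum_map_add_int]
    simp only [pvISum, List.map_cons, List.sum_cons] at ih ⊢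
    rw [ih, inter_length_sum]

lemma psum_cons (base S : List String) (L : List (List String)) :
    pvPSum base (S :: L) = pvISum (pvInter base S) L + pvPSum base L := by
  simp only [pvPSum, pvCombos2, List.map_append, List.sum_append]
  congr 1
  simp only [pvISum, List.map_map]
  rfl

-- the inclusion-exclusion core identity, per element
lemma core (base : List String) (L : List (List String)) :
    (base.length : Int) - pvISum base L + pvPSum base L
      = (base.map (fun x => pvG (pvCnt x L))).sum := by
  induction L with
  | nil =>
    have h1 : base.map (fun x => pvG (pvCnt x ([] : List (List String))))
        = base.map (fun _ => (1 : Int)) := by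
      apply List.map_congr_left; intro x _; simp [pvG, pvCnt, pvCh2]
    rw [h1, PySem.List.sum_map_const_int]
    simp [pvISum, pvPSum, pvCombos2]
  | cons S L ih =>
    have hI : pvISum base (S :: L)
        = (base.map (fun x => if x ∈ S then (1 : Int) else 0)).sum + pvISum base L := by
      simp only [pvISum, List.map_cons, List.sum_cons]
      rw [inter_length_sum]
    have hconv : ((pvInter base S).map (fun x => (pvCnt x L : Int))).sum
        = (base.map (fun x => if x ∈ S then (pvCnt x L : Int) else 0)).sum := by
      rw [show pvInter base S = base.filter (fun x => S.contains x) from rfl,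
        sum_map_filter_ite]
      apply congrArg
      apply List.map_congr_left
      intro x _
      by_cases h : x ∈ S <;> simp [h]
    rw [hI, psum_cons, isum_eq (pvInter base S) L, hconv]
    have hrhs : (base.map (fun x => pvG (pvCnt x (S :: L)))).sum
        = (base.map (fun x => pvG (pvCnt x L)
            + ((if x ∈ S then (pvCnt x L : Int) else 0)
               - (if x ∈ S then (1 : Int) else 0)))).sum := by
      apply congrArg
      apply List.map_congr_left
      intro x _
      simp only [pvCnt, List.countP_cons]
      by_cases h : x ∈ S
      · simp [h, pvG, pvCh2_succ]
        push_cast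
        ring
      · simp [h]
    rw [hrhs, PySem.List.sum_map_add_int, sum_map_sub_int]
    rw [← ih]
    ring

-- dict lookup on a nodup association list
lemma get?_mk_of_mem (zones : List (String × List String))
    (hk : (zones.map Prod.fst).Nodup) {p : String × List String} (hp : p ∈ zones) :
    (PySem.Dict.mk zones).get? p.1 = some p.2 := by
  induction zones with
  | nil => simp at hp
  | cons q rest ih =>
    rw [List.map_cons] at hk
    obtain ⟨hq, hk'⟩ := List.nodup_cons.1 hk
    rw [PySem.Dict.get?_mk_cons]
    rcases List.mem_cons.1 hp with h0 | h0
    · subst h0; simp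
    · have hne : ¬ (q.1 == p.1) = true := by
        simp only [beq_iff_eq]
        intro e
        exact hq (e ▸ List.mem_map_of_mem h0)
      simp only [hne, if_neg, Bool.false_eq_true, not_false_eq_true]
      exact ih hk' h0

lemma getD_mk_of_mem (zones : List (String × List String))
    (hk : (zones.map Prod.fst).Nodup) {p : String × List String} (hp : p ∈ zones) :
    (PySem.Dict.mk zones).getD p.1 [] = p.2 := by
  simp [PySem.Dict.getD, get?_mk_of_mem zones hk hp]

-- per-resource global count over a block of zones, all contents nodup
lemma sumcnt (x : String) (l : List (String × List String))
    (hv : ∀ q ∈ l, q.2.Nodup) :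
    List.count x (l.map Prod.snd).flatten = pvCnt x (l.map Prod.snd) := by
  induction l with
  | nil => simp [pvCnt]
  | cons q rest ih =>
    have hq2 := hv q List.mem_cons_self
    have hrest : ∀ r ∈ rest, r.2.Nodup := fun r hr => hv r (List.mem_cons_of_mem _ hr)
    simp only [List.map_cons, List.flatten_cons, List.count_append, pvCnt, List.countP_cons]
    rw [show List.countP (fun S => decide (x ∈ S)) (List.map Prod.snd rest)
        = pvCnt x (rest.map Prod.snd) from rfl, ← ih hrest]
    by_cases hm : x ∈ q.2
    · simp [List.count_eq_one_of_mem hq2 hm, hm]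
      omega
    · simp [List.count_eq_zero_of_not_mem hm, hm]

lemma cnt_total (zones : List (String × List String)) (p : String × List String) (x : String)
    (hk : (zones.map Prod.fst).Nodup) (hv : ∀ q ∈ zones, q.2.Nodup)
    (hp : p ∈ zones) (hx : x ∈ p.2) :
    List.count x (zones.map Prod.snd).flatten = 1 + pvCnt x (pvL zones p.1) := by
  induction zones with
  | nil => simp at hp
  | cons q rest ih =>
    rw [List.map_cons] at hk
    obtain ⟨hq, hk'⟩ := List.nodup_cons.1 hk
    have hvrest : ∀ r ∈ rest, r.2.Nodup := fun r hr => hv r (List.mem_cons_of_mem _ hr)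
    rcases List.mem_cons.1 hp with h0 | h0
    · subst h0
      have h1 : List.count x p.2 = 1 :=
        List.count_eq_one_of_mem (hv p List.mem_cons_self) hx
      have hfilter : rest.filter (fun r => r.1 != p.1) = rest := by
        apply List.filter_eq_self.2
        intro r hr
        simp only [bne_iff_ne, ne_eq]
        intro e
        exact hq (e ▸ List.mem_map_of_mem hr)
      simp only [List.map_cons, List.flatten_cons, List.count_append, h1, pvL, pvOth,
        List.filter_cons, bne_self_eq_false, Bool.false_eq_true, if_false, hfilter]
      rw [sumcnt x rest hvrest]
    · have hne : q.1 ≠ p.1 := by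
        intro e
        exact hq (e ▸ List.mem_map_of_mem h0)
      have hbne : (q.1 != p.1) = true := by simp [hne]
      have hcount : List.count x q.2 = if x ∈ q.2 then 1 else 0 := by
        by_cases hm : x ∈ q.2
        · simp [List.count_eq_one_of_mem (hv q List.mem_cons_self) hm, hm]
        · simp [List.count_eq_zero_of_not_mem hm, hm]
      simp only [List.map_cons, List.flatten_cons, List.count_append, hcount, pvL, pvOth,
        List.filter_cons, hbne, if_true, List.map_cons, pvCnt, List.countP_cons]
      rw [show List.countP (fun S => decide (x ∈ S))
            (List.map Prod.snd (List.filter (fun q => q.1 != p.1) rest))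
          = pvCnt x (pvL rest p.1) from rfl]
      rw [ih hk' hvrest h0]
      by_cases h : x ∈ q.2 <;> simp [h] <;> omega

-- B's counter dict is Counter of the concatenation of all zone contents
lemma cnt_dict_eq (zones : List (String × List String)) :
    zones.foldl (fun c p => p.2.foldl (fun c x => c.insert x (c.getD x 0 + 1)) c)
        (PySem.Dict.empty : PySem.Dict String Int)
      = PySem.Dict.counter (zones.map Prod.snd).flatten := by
  rw [← PySem.Dict.foldl_insert_getD_add_one_eq_counter, List.foldl_flatten, List.foldl_map]

-- folding insertions of fresh keys builds the items list directly
lemma foldl_insert_items {α : Type} (l : List α) (key : α → String) (val : α → Int)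
    (acc : PySem.Dict String Int) (hnd : (l.map key).Nodup)
    (hfresh : ∀ q ∈ l, acc.contains (key q) = false) :
    (l.foldl (fun r q => r.insert (key q) (val q)) acc).items
      = acc.items ++ l.map (fun q => (key q, val q)) := by
  induction l generalizing acc with
  | nil => simp
  | cons q rest ih =>
    rw [List.map_cons] at hnd
    obtain ⟨hq, hnd'⟩ := List.nodup_cons.1 hnd
    have hins := PySem.Dict.items_insert_of_not_contains acc (val q) (hfresh q List.mem_cons_self)
    have hfresh' : ∀ r ∈ rest, (acc.insert (key q) (val q)).contains (key r) = false := by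
      intro r hr
      rw [PySem.Dict.contains_insert]
      have h1 : (key r == key q) = false := by
        simp only [beq_eq_false_iff_ne, ne_eq]
        intro e
        exact hq (e ▸ List.mem_map_of_mem hr)
      simp [h1, hfresh r (List.mem_cons_of_mem _ hr)]
    simp only [List.foldl_cons]
    rw [ih _ hnd' hfresh', hins]
    simp

-- the A-side loop body computes the per-element sum
lemma abody_eq (zones : List (String × List String)) (hk : (zones.map Prod.fst).Nodup)
    (i : Int) (name : String)
    (hmem : (i, name) ∈ PySem.List.enumerate (zones.map Prod.fst) 0) :
    pvAbody (PySem.Dict.mk zones) (zones.map Prod.fst) (i, name) = pvSum zones name := by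
  have hname : name ∈ zones.map Prod.fst := by
    have h := List.mem_map_of_mem (f := fun (q : Int × String) => q.2) hmem
    rwa [PySem.List.map_snd_enumerate] at h
  unfold pvAbody
  simp only []
  set base := (PySem.Dict.mk zones).getD name []
  set f : String → Int :=
    fun n => ((pvInter base ((PySem.Dict.mk zones).getD n [])).length : Int) with hf
  -- inner (pairwise) loop
  have h1 : (PySem.List.enumerate (zones.map Prod.fst) 0).foldl
        (fun t jnj => if jnj.1 = i then t
          else t - ((pvInter base ((PySem.Dict.mk zones).getD jnj.2 [])).length : Int))
        ((base.length : Int))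
      = (base.length : Int) - (((zones.map Prod.fst).map f).sum - f name) := by
    rw [PySem.List.foldl_congr_mem _ _
      (fun t jnj => t - (if jnj.1 = i then 0 else f jnj.2)) _
      (by intro acc q _; by_cases h : q.1 = i <;> simp [h, hf])]
    rw [foldl_sub_sum, enum_sum_skip f (zones.map Prod.fst) 0 i name hmem]
  rw [h1]
  have hfname : f name = (base.length : Int) := by
    have hbb : pvInter base base = base :=
      List.filter_eq_self.2 (fun x hx => List.elem_eq_true_of_mem hx)
    show ((pvInter base ((PySem.Dict.mk zones).getD name [])).length : Int) = (base.length : Int)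
    rw [show (PySem.Dict.mk zones).getD name [] = base from rfl, hbb]
  rw [sum_split_mem f (zones.map Prod.fst) name hk hname, hfname]
  -- triple loop
  rw [PySem.List.foldl_add]
  -- rewrite the filtered name list as the mapped filtered zone list
  have hoth : (zones.map Prod.fst).filter (fun n => n != name)
      = (pvOth zones name).map Prod.fst := by
    rw [List.filter_map]
    rfl
  have hsub : ∀ q ∈ pvOth zones name, q ∈ zones := fun q hq => List.mem_of_mem_filter hq
  -- pairwise sum equals pvISum
  have h2 : (((zones.map Prod.fst).filter (fun n => n != name)).map f).sum
      = pvISum base (pvL zones name) := by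
    rw [hoth, List.map_map]
    unfold pvISum pvL
    rw [List.map_map]
    apply congrArg
    apply List.map_congr_left
    intro q hq
    simp only [Function.comp_apply, hf]
    rw [getD_mk_of_mem zones hk (hsub q hq)]
  -- triple sum equals pvPSum
  have h3 : ((pvCombos2 ((zones.map Prod.fst).filter (fun n => n != name))).map
        (fun ab => ((pvInter (pvInter base ((PySem.Dict.mk zones).getD ab.1 []))
          ((PySem.Dict.mk zones).getD ab.2 [])).length : Int))).sum
      = pvPSum base (pvL zones name) := by
    rw [hoth, combos2_map, List.map_map]
    unfold pvPSum pvL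
    rw [combos2_map, List.map_map]
    apply congrArg
    apply List.map_congr_left
    intro ab hab
    obtain ⟨ha, hb⟩ := combos2_mem hab
    simp only [Function.comp_apply]
    rw [getD_mk_of_mem zones hk (hsub _ ha), getD_mk_of_mem zones hk (hsub _ hb)]
  rw [h2, h3]
  have hcore := core base (pvL zones name)
  unfold pvSum
  rw [show (PySem.Dict.mk zones).getD name [] = base from rfl]
  rw [← hcore]
  ring

-- the B-side loop body computes the same per-element sum
lemma bbody_eq (zones : List (String × List String))
    (hk : (zones.map Prod.fst).Nodup) (hv : ∀ q ∈ zones, q.2.Nodup)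
    {p : String × List String} (hp : p ∈ zones) :
    pvBbody (PySem.Dict.counter (zones.map Prod.snd).flatten) p.2 = pvSum zones p.1 := by
  unfold pvBbody
  rw [show (fun (t : Int) (x : String) =>
        let d := (PySem.Dict.counter (zones.map Prod.snd).flatten).getD x 0 - 1
        t + (1 - d + PySem.Int.floordiv (d * (d - 1)) 2))
      = (fun t x => t + (fun x =>
          (1 - ((PySem.Dict.counter (zones.map Prod.snd).flatten).getD x 0 - 1)
            + PySem.Int.floordiv
              (((PySem.Dict.counter (zones.map Prod.snd).flatten).getD x 0 - 1)
                * (((PySem.Dict.counter (zones.map Prod.snd).flatten).getD x 0 - 1) - 1)) 2)) x)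
      from rfl]
  rw [PySem.List.foldl_add]
  unfold pvSum
  rw [getD_mk_of_mem zones hk hp]
  rw [zero_add]
  apply congrArg
  apply List.map_congr_left
  intro x hx
  rw [PySem.Dict.getD_counter]
  rw [cnt_total zones p x hk hv hp hx]
  set c := pvCnt x (pvL zones p.1)
  rw [show ((1 + c : Nat) : Int) - 1 = (c : Int) by push_cast; ring]
  rw [pvFD c]
  simp [pvG]

-- main equivalence
lemma equiv_main (zones : List (String × List String))
    (hk : (zones.map Prod.fst).Nodup) (hv : ∀ q ∈ zones, q.2.Nodup) :
    inclusion_exclusion_total zones = inclusion_exclusion_total_alt zones := by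
  have hndA : ((PySem.List.enumerate (zones.map Prod.fst) 0).map (fun q => q.2)).Nodup := by
    rw [PySem.List.map_snd_enumerate]; exact hk
  have hA : inclusion_exclusion_total zones
      = (PySem.List.enumerate (zones.map Prod.fst) 0).map
          (fun q => (q.2, max 0 (pvAbody (PySem.Dict.mk zones) (zones.map Prod.fst) q))) :=
    (foldl_insert_items (PySem.List.enumerate (zones.map Prod.fst) 0) (fun q => q.2)
      (fun q => max 0 (pvAbody (PySem.Dict.mk zones) (zones.map Prod.fst) q))
      PySem.Dict.empty hndA (fun q _ => by simp [PySem.Dict.contains, PySem.Dict.empty])).trans rfl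
  have hB : inclusion_exclusion_total_alt zones
      = zones.map (fun p =>
          (p.1, max 0 (pvBbody (PySem.Dict.counter (zones.map Prod.snd).flatten) p.2))) := by
    have e0 : inclusion_exclusion_total_alt zones
        = (zones.foldl (fun result p =>
            result.insert p.1 (max 0 (pvBbody
              (PySem.Dict.counter (zones.map Prod.snd).flatten) p.2)))
            PySem.Dict.empty).items := by
      rw [show inclusion_exclusion_total_alt zones
          = (zones.foldl (fun result p =>
              result.insert p.1 (max 0 (pvBbody
                (zones.foldl (fun c p => p.2.foldl (fun c x => c.insert x (c.getD x 0 + 1)) c)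
                  (PySem.Dict.empty : PySem.Dict String Int)) p.2)))
              PySem.Dict.empty).items from rfl]
      rw [cnt_dict_eq]
    rw [e0]
    exact (foldl_insert_items zones Prod.fst
      (fun p => max 0 (pvBbody (PySem.Dict.counter (zones.map Prod.snd).flatten) p.2))
      PySem.Dict.empty hk (fun q _ => by simp [PySem.Dict.contains, PySem.Dict.empty])).trans rfl
  rw [hA, hB]
  have hA2 : (PySem.List.enumerate (zones.map Prod.fst) 0).map
        (fun q => (q.2, max 0 (pvAbody (PySem.Dict.mk zones) (zones.map Prod.fst) q)))
      = (PySem.List.enumerate (zones.map Prod.fst) 0).map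
        (fun q => (q.2, max 0 (pvSum zones q.2))) := by
    apply List.map_congr_left
    intro q hq
    have hq' : (q.1, q.2) ∈ PySem.List.enumerate (zones.map Prod.fst) 0 := by
      simpa using hq
    rw [abody_eq zones hk q.1 q.2 hq']
  rw [hA2]
  rw [show (fun (q : Int × String) => (q.2, max 0 (pvSum zones q.2)))
      = (fun n => (n, max 0 (pvSum zones n))) ∘ (fun (q : Int × String) => q.2) from rfl,
    ← List.map_map, PySem.List.map_snd_enumerate, List.map_map]
  apply List.map_congr_left
  intro p hp
  simp only [Function.comp_apply]
  rw [bbody_eq zones hk hv hp]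

-- ===== VERDICT (by name: the statement is the Claim_ definition above) =====
theorem inclusion_exclusion_total_spec : Claim_equal_inclusion_exclusion_total := by
  intro zones _ hpre
  unfold Spec_inclusion_exclusion_total
  exact equiv_main zones hpre.1 hpre.2
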